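-- pv_equiv track=rewrite | github.com/RGreinacher/bachelor-thesis | Apps/Auswertung/answer_class_correction_analysis.py | normailize_sentence_length
-- ===== SOURCE A (Python) =====
-- def normailize_sentence_length(preannotation_sentence, subject_annotation_sentence):
--     index = 0
--     while True:
--         pre_length = len(preannotation_sentence)
--         sub_length = len(subject_annotation_sentence)
--         if index >= pre_length and index >= sub_length:
--             return (preannotation_sentence, subject_annotation_sentence)
--
--         if index >= pre_length and subject_annotation_sentence[index] == 4:
--             preannotation_sentence.insert(index, 9)
--         elif index >= sub_length and preannotation_sentence[index] == 4:
--             subject_annotation_sentence.insert(index, 9)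
--         elif preannotation_sentence[index] == 4 and subject_annotation_sentence[index] != 4:
--             subject_annotation_sentence.insert(index, 9)
--         elif preannotation_sentence[index] != 4 and subject_annotation_sentence[index] == 4:
--             preannotation_sentence.insert(index, 9)
--
--         index += 1
-- ===== SOURCE B (Python) =====
-- # B: single left-to-right pass over both lists in aligned chunks: C-level list.index locates the
-- # next 4 on each side, the non-4 stretch in between is paired up and copied by slicing, and only
-- # the 4/padding positions are handled element-wise (no O(n) in-place inserts, no per-element
-- # Python loop on 4-free stretches). On misaligned input (one list exhausted while the other still
-- # holds an element != 4) B raises IndexError just as A does.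
-- # Note: A mutates its arguments in place; B does not - equivalence is about the return value only.
-- def normailize_sentence_length(preannotation_sentence, subject_annotation_sentence):
--     p, s = preannotation_sentence, subject_annotation_sentence
--     n, m = len(p), len(s)
--     out_p, out_s = [], []
--     i = j = 0
--     while i < n or j < m:
--         try:
--             ni = p.index(4, i)
--         except ValueError:
--             ni = n
--         try:
--             nj = s.index(4, j)
--         except ValueError:
--             nj = m
--         k = min(ni - i, nj - j)
--         if k:
--             out_p += p[i:i + k]
--             out_s += s[j:j + k]
--             i += k
--             j += k
--             continue
--         pi4 = i < n and ni == i
--         sj4 = j < m and nj == j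
--         if pi4 and sj4:
--             out_p.append(4)
--             out_s.append(4)
--             i += 1
--             j += 1
--         elif pi4:
--             out_p.append(4)
--             out_s.append(9)
--             i += 1
--         elif sj4:
--             out_p.append(9)
--             out_s.append(4)
--             j += 1
--         else:
--             # one list is exhausted while the other still holds an element != 4
--             raise IndexError('list index out of range')
--     return (out_p, out_s)
-- ===== Notes on version B (the rewrite author's own statement) =====
-- stated objective: alternative
-- what changed: A walks an index over the two lists, re-reading lengths and doing in-place list.insert padding at every mismatched 4; B makes one left-to-right pass in aligned chunks, locating the next 4 on each side with list.index and copying the non-4 stretch in between by slicing into freshly built output lists (B does not mutate its arguments; the return value is identical, and B raises IndexError on the same misaligned inputs A does). Intended as faster (B avoids A's per-insert element shifting); …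
import Mathlib
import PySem

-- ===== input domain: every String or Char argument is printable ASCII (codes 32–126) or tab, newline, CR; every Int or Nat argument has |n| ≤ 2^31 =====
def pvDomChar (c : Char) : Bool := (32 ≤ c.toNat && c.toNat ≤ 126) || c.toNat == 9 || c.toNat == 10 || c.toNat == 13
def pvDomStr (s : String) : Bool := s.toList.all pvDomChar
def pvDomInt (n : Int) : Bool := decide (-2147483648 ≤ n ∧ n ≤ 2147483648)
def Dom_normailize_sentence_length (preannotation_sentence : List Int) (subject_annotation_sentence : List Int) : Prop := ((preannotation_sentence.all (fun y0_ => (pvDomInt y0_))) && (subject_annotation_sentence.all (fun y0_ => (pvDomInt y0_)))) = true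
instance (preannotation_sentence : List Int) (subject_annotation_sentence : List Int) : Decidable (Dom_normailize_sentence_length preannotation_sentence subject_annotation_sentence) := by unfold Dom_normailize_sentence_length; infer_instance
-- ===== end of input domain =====

-- B replaces A's index loop with in-place insert padding by a single left-to-right pass in aligned
-- chunks (next 4 located per side via list.index, the non-4 stretch between copied by slicing),
-- building new output lists; on misaligned input (one list exhausted while the other still holds
-- an element != 4) B raises IndexError just as A does. A mutates its arguments in place, B does
-- not: the equivalence proved here is about the RETURN value only.

-- ===== PORT A =====
-- Literal port of A's while-True loop: fuel is only a termination guard (proved sufficient below);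
-- the out-of-range reads on which Python raises IndexError read `.getD 0` here and are excluded by Pre_.
def nslLoopA (fuel : Nat) (index : Nat) (pre sub : List Int) : List (List Int) :=
  match fuel with
  | 0 => [pre, sub]
  | fuel + 1 =>
    let pre_length := pre.length
    let sub_length := sub.length
    if index ≥ pre_length ∧ index ≥ sub_length then [pre, sub]
    else if index ≥ pre_length ∧ (PySem.List.pyGet? sub (index : Int)).getD 0 = 4 then
      nslLoopA fuel (index + 1) (PySem.List.insert pre (index : Int) 9) sub
    else if index ≥ sub_length ∧ (PySem.List.pyGet? pre (index : Int)).getD 0 = 4 then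
      nslLoopA fuel (index + 1) pre (PySem.List.insert sub (index : Int) 9)
    else if (PySem.List.pyGet? pre (index : Int)).getD 0 = 4 ∧ (PySem.List.pyGet? sub (index : Int)).getD 0 ≠ 4 then
      nslLoopA fuel (index + 1) pre (PySem.List.insert sub (index : Int) 9)
    else if (PySem.List.pyGet? pre (index : Int)).getD 0 ≠ 4 ∧ (PySem.List.pyGet? sub (index : Int)).getD 0 = 4 then
      nslLoopA fuel (index + 1) (PySem.List.insert pre (index : Int) 9) sub
    else nslLoopA fuel (index + 1) pre sub

def normailize_sentence_length (preannotation_sentence : List Int) (subject_annotation_sentence : List Int) : List (List Int) :=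
  nslLoopA (preannotation_sentence.length + subject_annotation_sentence.length + 1) 0
    preannotation_sentence subject_annotation_sentence

-- ===== PORT B =====
-- Port of Source B's chunked two-pointer pass: the consumed prefixes are implicit, the suffixes are the
-- pointers; PySem.List.index? is Python's list.index(4, i) on the suffix (fuel is a termination
-- guard only: each step consumes at least one element). In the final else branch Source B raises
-- IndexError; the port returns a dummy there — exactly those inputs are excluded by Pre_.
def nslChunk : Nat → List Int → List Int → List Int × List Int
  | 0, _, _ => ([], [])
  | fuel + 1, p, s =>
    if p.isEmpty && s.isEmpty then ([], [])
    else
      let ni := (PySem.List.index? p 4).getD p.length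
      let nj := (PySem.List.index? s 4).getD s.length
      let k := min ni nj
      if k ≠ 0 then
        let r := nslChunk fuel (p.drop k) (s.drop k)
        (p.take k ++ r.1, s.take k ++ r.2)
      else
        if (p ≠ [] ∧ ni = 0) ∧ (s ≠ [] ∧ nj = 0) then
          let r := nslChunk fuel p.tail s.tail
          (4 :: r.1, 4 :: r.2)
        else if p ≠ [] ∧ ni = 0 then
          let r := nslChunk fuel p.tail s
          (4 :: r.1, 9 :: r.2)
        else if s ≠ [] ∧ nj = 0 then
          let r := nslChunk fuel p s.tail
          (9 :: r.1, 4 :: r.2)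
        else ([], [])  -- Source B: raise IndexError (misaligned input, outside Pre_)

def normailize_sentence_length_alt (preannotation_sentence : List Int) (subject_annotation_sentence : List Int) : List (List Int) :=
  [(nslChunk (preannotation_sentence.length + subject_annotation_sentence.length) preannotation_sentence subject_annotation_sentence).1,
   (nslChunk (preannotation_sentence.length + subject_annotation_sentence.length) preannotation_sentence subject_annotation_sentence).2]

-- ===== PRECONDITION & SPEC =====
-- Pre_ excludes exactly the inputs on which A raises IndexError: A returns normally iff the two
-- lists contain the same number of elements ≠ 4 (otherwise one list runs out while the other
-- still holds an unmatched element ≠ 4 and the indexing raises); B raises IndexError there too.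
def Pre_normailize_sentence_length (preannotation_sentence : List Int) (subject_annotation_sentence : List Int) : Prop :=
  preannotation_sentence.countP (fun x => x != 4) = subject_annotation_sentence.countP (fun x => x != 4)
instance (preannotation_sentence : List Int) (subject_annotation_sentence : List Int) : Decidable (Pre_normailize_sentence_length preannotation_sentence subject_annotation_sentence) := by unfold Pre_normailize_sentence_length; infer_instance

def pvWitness_normailize_sentence_length : List Int × List Int := ([4, 1, 2], [1, 4, 2])

def Spec_normailize_sentence_length (preannotation_sentence : List Int) (subject_annotation_sentence : List Int) (out : List (List Int)) : Prop := out = normailize_sentence_length_alt preannotation_sentence subject_annotation_sentence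
instance (preannotation_sentence : List Int) (subject_annotation_sentence : List Int) (out : List (List Int)) : Decidable (Spec_normailize_sentence_length preannotation_sentence subject_annotation_sentence out) := by unfold Spec_normailize_sentence_length; infer_instance

-- ===== CLAIM (what is proved, stated in full; the proofs are below) =====
def Claim_equal_normailize_sentence_length : Prop := ∀ (preannotation_sentence : List Int) (subject_annotation_sentence : List Int), Dom_normailize_sentence_length preannotation_sentence subject_annotation_sentence → Pre_normailize_sentence_length preannotation_sentence subject_annotation_sentence → Spec_normailize_sentence_length preannotation_sentence subject_annotation_sentence (normailize_sentence_length preannotation_sentence subject_annotation_sentence)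

-- ===== LEMMAS AND PROOFS =====

-- proof-only bridge: the per-element two-pointer walk; A's loop and B's chunked pass both compute it
def nslWalk : Nat → List Int → List Int → List Int × List Int
  | 0, _, _ => ([], [])
  | fuel + 1, p, s =>
    match p, s with
    | [], [] => ([], [])
    | [], b :: s =>
      let r := nslWalk fuel [] s
      if b = 4 then (9 :: r.1, b :: r.2) else (r.1, b :: r.2)
    | a :: p, [] =>
      let r := nslWalk fuel p []
      if a = 4 then (a :: r.1, 9 :: r.2) else (a :: r.1, r.2)
    | a :: p, b :: s =>
      if a = 4 ∧ b ≠ 4 then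
        let r := nslWalk fuel p (b :: s)
        (4 :: r.1, 9 :: r.2)
      else if a ≠ 4 ∧ b = 4 then
        let r := nslWalk fuel (a :: p) s
        (9 :: r.1, 4 :: r.2)
      else
        let r := nslWalk fuel p s
        (a :: r.1, b :: r.2)

lemma nslWalk_fuel : ∀ (f g : Nat) (p s : List Int), p.length + s.length ≤ f →
    p.length + s.length ≤ g → nslWalk f p s = nslWalk g p s := by
  intro f
  induction f with
  | zero =>
    intro g p s hf hg
    have hp : p = [] := by cases p <;> simp_all
    have hs : s = [] := by cases s <;> simp_all
    subst hp; subst hs; cases g <;> rfl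
  | succ f ih =>
    intro g p s hf hg
    match p, s with
    | [], [] => cases g <;> rfl
    | [], b :: s' =>
      obtain ⟨g', rfl⟩ : ∃ g', g = g' + 1 := ⟨g - 1, by simp at hg; omega⟩
      simp only [nslWalk]
      rw [ih g' [] s' (by simp at hf ⊢; omega) (by simp at hg ⊢; omega)]
    | a :: p', [] =>
      obtain ⟨g', rfl⟩ : ∃ g', g = g' + 1 := ⟨g - 1, by simp at hg; omega⟩
      simp only [nslWalk]
      rw [ih g' p' [] (by simp at hf ⊢; omega) (by simp at hg ⊢; omega)]
    | a :: p', b :: s' =>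
      obtain ⟨g', rfl⟩ : ∃ g', g = g' + 1 := ⟨g - 1, by simp at hg; omega⟩
      simp only [nslWalk]
      rw [ih g' p' (b :: s') (by simp at hf ⊢; omega) (by simp at hg ⊢; omega),
        ih g' (a :: p') s' (by simp at hf ⊢; omega) (by simp at hg ⊢; omega),
        ih g' p' s' (by simp at hf ⊢; omega) (by simp at hg ⊢; omega)]

lemma insert_of_length_le (xs : List Int) (i : Nat) (h : xs.length ≤ i) (v : Int) :
    PySem.List.insert xs (i : Int) v = xs ++ [v] := by
  have h1 : ¬ ((i : Int) < 0) := by omega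
  simp [PySem.List.insert, PySem.List.sliceIndices, h1]
  rw [min_def]
  split
  · simp [List.take_of_length_le h, List.drop_of_length_le h]
  · simp

-- helper: element lookup at the boundary / past the end
lemma pyGetD_boundary (ds : List Int) (b : Int) (s' : List Int) (i : Nat) (h : ds.length = i) :
    (PySem.List.pyGet? (ds ++ b :: s') (i : Int)).getD 0 = b := by
  subst h; rw [PySem.List.pyGet?_append_length]; rfl

lemma pyGetD_past (dp : List Int) (i : Nat) (h : dp.length ≤ i) :
    (PySem.List.pyGet? dp (i : Int)).getD 0 = 0 := by
  rw [PySem.List.pyGet?_natCast, List.getElem?_eq_none h]; rfl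

-- Loop invariant for A: at index i the first i slots of each list are settled (dp, ds); the loop
-- acts on the remaining suffixes exactly like the element walk (in fuel lockstep).
lemma nslLoopA_eq (fuel : Nat) : ∀ (p s dp ds : List Int) (i : Nat),
    dp.length ≤ i → ds.length ≤ i → (p ≠ [] → dp.length = i) → (s ≠ [] → ds.length = i) →
    p.length + s.length < fuel →
    nslLoopA fuel i (dp ++ p) (ds ++ s) = [dp ++ (nslWalk fuel p s).1, ds ++ (nslWalk fuel p s).2] := by
  induction fuel with
  | zero => intro p s dp ds i _ _ _ _ hf; omega
  | succ fuel ih =>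
    intro p s dp ds i hdp hds hpe hse hf
    match p, s with
    | [], [] =>
      simp [nslLoopA, nslWalk, hdp, hds]
    | [], b :: s' =>
      have hds' : ds.length = i := hse (by simp)
      have hlen : (ds ++ b :: s').length = i + (s'.length + 1) := by simp [hds']
      have gb := pyGetD_boundary ds b s' i hds'
      have gp := pyGetD_past dp i hdp
      simp only [List.append_nil, nslLoopA, nslWalk]
      rw [if_neg (by rw [hlen]; omega)]
      by_cases hb : b = 4
      · rw [if_pos ⟨hdp, by rw [gb]; exact hb⟩, insert_of_length_le dp i hdp 9,
          show ds ++ b :: s' = (ds ++ [b]) ++ s' by simp]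
        have H := ih [] s' (dp ++ [9]) (ds ++ [b]) (i + 1)
          (by simp; omega) (by simp [hds']) (by simp) (fun _ => by simp [hds'])
          (by simp at hf ⊢; omega)
        simp only [List.append_nil] at H
        rw [H]; simp [hb]
      · rw [if_neg (by rw [gb]; exact fun h => hb h.2),
          if_neg (by rw [hlen]; exact fun h => by omega),
          if_neg (by rw [gp]; exact fun h => by norm_num at h),
          if_neg (by rw [gb]; exact fun h => hb h.2),
          show ds ++ b :: s' = (ds ++ [b]) ++ s' by simp]
        have H := ih [] s' dp (ds ++ [b]) (i + 1)
          (by omega) (by simp [hds']) (by simp) (fun _ => by simp [hds'])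
          (by simp at hf ⊢; omega)
        simp only [List.append_nil] at H
        rw [H]; simp [hb]
    | a :: p', [] =>
      have hdp' : dp.length = i := hpe (by simp)
      have hlen : (dp ++ a :: p').length = i + (p'.length + 1) := by simp [hdp']
      have ga := pyGetD_boundary dp a p' i hdp'
      have gs := pyGetD_past ds i hds
      simp only [List.append_nil, nslLoopA, nslWalk]
      rw [if_neg (by rw [hlen]; exact fun h => by omega)]
      by_cases ha : a = 4
      · rw [if_neg (by rw [hlen]; exact fun h => by omega),
          if_pos ⟨hds, by rw [ga]; exact ha⟩, insert_of_length_le ds i hds 9,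
          show dp ++ a :: p' = (dp ++ [a]) ++ p' by simp]
        have H := ih p' [] (dp ++ [a]) (ds ++ [9]) (i + 1)
          (by simp [hdp']) (by simp; omega) (fun _ => by simp [hdp']) (by simp)
          (by simp at hf ⊢; omega)
        simp only [List.append_nil] at H
        rw [H]; simp [ha]
      · rw [if_neg (by rw [hlen]; exact fun h => by omega),
          if_neg (by rw [ga]; exact fun h => ha h.2),
          if_neg (by rw [ga]; exact fun h => ha h.1),
          if_neg (by rw [gs]; exact fun h => by norm_num at h),
          show dp ++ a :: p' = (dp ++ [a]) ++ p' by simp]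
        have H := ih p' [] (dp ++ [a]) ds (i + 1)
          (by simp [hdp']) (by omega) (fun _ => by simp [hdp']) (by simp)
          (by simp at hf ⊢; omega)
        simp only [List.append_nil] at H
        rw [H]; simp [ha]
    | a :: p', b :: s' =>
      have hdp' : dp.length = i := hpe (by simp)
      have hds' : ds.length = i := hse (by simp)
      have hlenp : (dp ++ a :: p').length = i + (p'.length + 1) := by simp [hdp']
      have hlens : (ds ++ b :: s').length = i + (s'.length + 1) := by simp [hds']
      have ga := pyGetD_boundary dp a p' i hdp'
      have gb := pyGetD_boundary ds b s' i hds'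
      simp only [nslLoopA, nslWalk]
      rw [if_neg (by rw [hlenp]; exact fun h => by omega),
        if_neg (by rw [hlenp]; exact fun h => by omega),
        if_neg (by rw [hlens]; exact fun h => by omega)]
      by_cases ha : a = 4 <;> by_cases hb : b = 4
      · -- a = 4, b = 4: both advance
        rw [if_neg (by rw [gb]; exact fun h => h.2 hb),
          if_neg (by rw [ga]; exact fun h => h.1 ha),
          show dp ++ a :: p' = (dp ++ [a]) ++ p' by simp,
          show ds ++ b :: s' = (ds ++ [b]) ++ s' by simp]
        have H := ih p' s' (dp ++ [a]) (ds ++ [b]) (i + 1)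
          (by simp [hdp']) (by simp [hds']) (fun _ => by simp [hdp']) (fun _ => by simp [hds'])
          (by simp at hf ⊢; omega)
        rw [H]; simp [ha, hb]
      · -- a = 4, b ≠ 4
        rw [if_pos (by rw [ga, gb]; exact ⟨ha, hb⟩),
          show PySem.List.insert (ds ++ b :: s') (i : Int) 9 = (ds ++ [9]) ++ b :: s' by
            rw [show ((i : Nat) : Int) = ((ds.length : Nat) : Int) by rw [hds'],
              PySem.List.insert_natCast _ _ _ (by simp)]
            simp,
          show dp ++ a :: p' = (dp ++ [a]) ++ p' by simp]
        have H := ih p' (b :: s') (dp ++ [a]) (ds ++ [9]) (i + 1)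
          (by simp [hdp']) (by simp [hds']) (fun _ => by simp [hdp']) (fun _ => by simp [hds'])
          (by simp at hf ⊢; omega)
        rw [H]; simp [ha, hb]
      · -- a ≠ 4, b = 4
        rw [if_neg (by rw [ga]; exact fun h => ha h.1),
          if_pos (by rw [ga, gb]; exact ⟨ha, hb⟩),
          show PySem.List.insert (dp ++ a :: p') (i : Int) 9 = (dp ++ [9]) ++ a :: p' by
            rw [show ((i : Nat) : Int) = ((dp.length : Nat) : Int) by rw [hdp'],
              PySem.List.insert_natCast _ _ _ (by simp)]
            simp,
          show ds ++ b :: s' = (ds ++ [b]) ++ s' by simp]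
        have H := ih (a :: p') s' (dp ++ [9]) (ds ++ [b]) (i + 1)
          (by simp [hdp']) (by simp [hds']) (fun _ => by simp [hdp']) (fun _ => by simp [hds'])
          (by simp at hf ⊢; omega)
        rw [H]; simp [ha, hb]
      · -- neither is 4: both advance
        rw [if_neg (by rw [ga]; exact fun h => ha h.1),
          if_neg (by rw [gb]; exact fun h => hb h.2),
          show dp ++ a :: p' = (dp ++ [a]) ++ p' by simp,
          show ds ++ b :: s' = (ds ++ [b]) ++ s' by simp]
        have H := ih p' s' (dp ++ [a]) (ds ++ [b]) (i + 1)
          (by simp [hdp']) (by simp [hds']) (fun _ => by simp [hdp']) (fun _ => by simp [hds'])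
          (by simp at hf ⊢; omega)
        rw [H]; simp [ha, hb]

-- one-step unfoldings of the walk (rfl lemmas, to control fuel unfolding)
lemma nslWalk_nil_cons (f : Nat) (b : Int) (s : List Int) :
    nslWalk (f + 1) [] (b :: s) =
      if b = 4 then (9 :: (nslWalk f [] s).1, b :: (nslWalk f [] s).2)
      else ((nslWalk f [] s).1, b :: (nslWalk f [] s).2) := rfl

lemma nslWalk_cons_nil (f : Nat) (a : Int) (p : List Int) :
    nslWalk (f + 1) (a :: p) [] =
      if a = 4 then (a :: (nslWalk f p []).1, 9 :: (nslWalk f p []).2)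
      else (a :: (nslWalk f p []).1, (nslWalk f p []).2) := rfl

lemma nslWalk_cons_cons (f : Nat) (a b : Int) (p s : List Int) :
    nslWalk (f + 1) (a :: p) (b :: s) =
      if a = 4 ∧ b ≠ 4 then (4 :: (nslWalk f p (b :: s)).1, 9 :: (nslWalk f p (b :: s)).2)
      else if a ≠ 4 ∧ b = 4 then (9 :: (nslWalk f (a :: p) s).1, 4 :: (nslWalk f (a :: p) s).2)
      else (a :: (nslWalk f p s).1, b :: (nslWalk f p s).2) := rfl

-- distance to the first 4 steps down through a non-4 head
lemma ni_cons_of_ne (a : Int) (p : List Int) (ha : a ≠ 4) :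
    ((PySem.List.index? (a :: p) 4).getD (a :: p).length) = ((PySem.List.index? p 4).getD p.length) + 1 := by
  rw [PySem.List.index?_cons_of_ne p ha]
  cases h : PySem.List.index? p 4 <;> simp

lemma ni_cons_self (p : List Int) :
    ((PySem.List.index? ((4 : Int) :: p) 4).getD ((4 : Int) :: p).length) = 0 := by
  rw [PySem.List.index?_cons_self]
  rfl

lemma ni_nil : ((PySem.List.index? ([] : List Int) 4).getD ([] : List Int).length) = 0 := rfl

lemma ni_le_length (p : List Int) : (PySem.List.index? p 4).getD p.length ≤ p.length := by
  cases h : PySem.List.index? p 4 with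
  | none => simp
  | some k =>
    obtain ⟨pre, suf, _, hl, _⟩ := (PySem.List.index?_eq_some_iff p 4 k).mp h
    simp_all

-- a stretch that both distances clear is copied verbatim by the element walk
lemma walk_skip : ∀ (k : Nat) (p s : List Int),
    k ≤ (PySem.List.index? p 4).getD p.length → k ≤ (PySem.List.index? s 4).getD s.length →
    k ≤ p.length → k ≤ s.length →
    nslWalk (p.length + s.length) p s =
      (p.take k ++ (nslWalk ((p.length - k) + (s.length - k)) (p.drop k) (s.drop k)).1,
       s.take k ++ (nslWalk ((p.length - k) + (s.length - k)) (p.drop k) (s.drop k)).2) := by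
  intro k
  induction k with
  | zero => intro p s _ _ _ _; simp
  | succ k ih =>
    intro p s hni hnj hkp hks
    match p, s with
    | a :: p', b :: s' =>
      have ha : a ≠ 4 := by
        intro h; subst h; rw [ni_cons_self] at hni; omega
      have hb : b ≠ 4 := by
        intro h; subst h; rw [ni_cons_self] at hnj; omega
      have hni' : k ≤ (PySem.List.index? p' 4).getD p'.length := by
        rw [ni_cons_of_ne a p' ha] at hni; omega
      have hnj' : k ≤ (PySem.List.index? s' 4).getD s'.length := by
        rw [ni_cons_of_ne b s' hb] at hnj; omega
      have hl : (a :: p').length + (b :: s').length = (p'.length + s'.length + 1) + 1 := by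
        simp; omega
      have hkp' : k ≤ p'.length := by simp only [List.length_cons] at hkp; omega
      have hks' : k ≤ s'.length := by simp only [List.length_cons] at hks; omega
      rw [hl, nslWalk_cons_cons, if_neg (fun h => ha h.1), if_neg (fun h => hb h.2),
        nslWalk_fuel (p'.length + s'.length + 1) (p'.length + s'.length) p' s' (by omega) (by omega),
        ih p' s' hni' hnj' hkp' hks']
      have e : (a :: p').length - (k + 1) + ((b :: s').length - (k + 1)) =
          p'.length - k + (s'.length - k) := by simp only [List.length_cons]; omega
      simp only [List.take_succ_cons, List.drop_succ_cons, e, List.cons_append]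

-- elements before the first 4 are all ≠ 4: dropping k of them removes k from the non-4 count
lemma countP_drop_index : ∀ (k : Nat) (p : List Int),
    k ≤ (PySem.List.index? p 4).getD p.length → k ≤ p.length →
    (p.drop k).countP (fun x => x != 4) + k = p.countP (fun x => x != 4) := by
  intro k
  induction k with
  | zero => intro p _ _; simp
  | succ k ih =>
    intro p hni hkp
    match p with
    | a :: p' =>
      have ha : a ≠ 4 := by
        intro h; subst h; rw [ni_cons_self] at hni; omega
      have hni' : k ≤ (PySem.List.index? p' 4).getD p'.length := by
        rw [ni_cons_of_ne a p' ha] at hni; omega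
      have hkp' : k ≤ p'.length := by simp only [List.length_cons] at hkp; omega
      have := ih p' hni' hkp'
      simp only [List.drop_succ_cons, List.countP_cons]
      simp [ha]
      omega

-- one-step branch equations for the chunked pass
lemma chunk_nil_cons4 (f : Nat) (s : List Int) :
    nslChunk (f + 1) [] ((4 : Int) :: s) = (9 :: (nslChunk f [] s).1, 4 :: (nslChunk f [] s).2) := by
  simp only [nslChunk, ni_cons_self, ni_nil]
  simp

lemma chunk_cons4_nil (f : Nat) (p : List Int) :
    nslChunk (f + 1) ((4 : Int) :: p) [] = (4 :: (nslChunk f p []).1, 9 :: (nslChunk f p []).2) := by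
  simp only [nslChunk, ni_cons_self, ni_nil]
  simp

lemma chunk_cons4_cons4 (f : Nat) (p s : List Int) :
    nslChunk (f + 1) ((4 : Int) :: p) ((4 : Int) :: s) =
      (4 :: (nslChunk f p s).1, 4 :: (nslChunk f p s).2) := by
  simp only [nslChunk, ni_cons_self]
  simp

lemma chunk_cons4_cons (f : Nat) (p : List Int) (b : Int) (s : List Int) (hb : b ≠ 4) :
    nslChunk (f + 1) ((4 : Int) :: p) (b :: s) =
      (4 :: (nslChunk f p (b :: s)).1, 9 :: (nslChunk f p (b :: s)).2) := by
  have h := ni_cons_of_ne b s hb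
  simp only [nslChunk, ni_cons_self, h]
  simp

lemma chunk_cons_cons4 (f : Nat) (a : Int) (p : List Int) (s : List Int) (ha : a ≠ 4) :
    nslChunk (f + 1) (a :: p) ((4 : Int) :: s) =
      (9 :: (nslChunk f (a :: p) s).1, 4 :: (nslChunk f (a :: p) s).2) := by
  have h := ni_cons_of_ne a p ha
  simp only [nslChunk, ni_cons_self, h]
  simp

-- on inputs with equal non-4 counts (Pre_) the chunked pass computes exactly the element walk
lemma chunk_eq_walk : ∀ (f : Nat) (p s : List Int),
    p.countP (fun x => x != 4) = s.countP (fun x => x != 4) →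
    p.length + s.length ≤ f →
    nslChunk f p s = nslWalk (p.length + s.length) p s := by
  intro f
  induction f with
  | zero =>
    intro p s _ h
    have hp : p = [] := List.length_eq_zero_iff.mp (by omega)
    have hs : s = [] := List.length_eq_zero_iff.mp (by omega)
    subst hp; subst hs; rfl
  | succ f ih =>
    intro p s hc hf
    rcases p with _ | ⟨a, p'⟩ <;> rcases s with _ | ⟨b, s'⟩
    · rfl
    · by_cases hb : b = 4
      · subst hb
        have hc' : ([] : List Int).countP (fun x => x != 4) = s'.countP (fun x => x != 4) := by
          simp only [List.countP_cons] at hc; simp at hc ⊢; omega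
        rw [chunk_nil_cons4, ih [] s' hc' (by simp only [List.length_nil, List.length_cons] at hf ⊢; omega)]
        simp only [List.length_nil, List.length_cons, Nat.zero_add]
        rw [nslWalk_nil_cons]
        simp
      · exfalso
        simp [hb] at hc
    · by_cases ha : a = 4
      · subst ha
        have hc' : p'.countP (fun x => x != 4) = ([] : List Int).countP (fun x => x != 4) := by
          simp only [List.countP_cons] at hc; simp at hc ⊢; omega
        rw [chunk_cons4_nil, ih p' [] hc' (by simp only [List.length_nil, List.length_cons] at hf ⊢; omega)]
        simp only [List.length_nil, List.length_cons, Nat.add_zero]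
        rw [nslWalk_cons_nil]
        simp
      · exfalso
        simp [ha] at hc
    · by_cases ha : a = 4 <;> by_cases hb : b = 4
      · subst ha; subst hb
        have hc' : p'.countP (fun x => x != 4) = s'.countP (fun x => x != 4) := by
          simp only [List.countP_cons] at hc; simp at hc ⊢; omega
        rw [chunk_cons4_cons4, ih p' s' hc' (by simp only [List.length_cons] at hf ⊢; omega)]
        simp only [List.length_cons]
        rw [show p'.length + 1 + (s'.length + 1) = (p'.length + s'.length + 1) + 1 by omega,
          nslWalk_cons_cons,
          if_neg (by intro h; exact h.2 rfl), if_neg (by intro h; exact h.1 rfl),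
          nslWalk_fuel (p'.length + s'.length + 1) (p'.length + s'.length) p' s'
            (by omega) (by omega)]
      · subst ha
        have hc' : p'.countP (fun x => x != 4) = (b :: s').countP (fun x => x != 4) := by
          simp only [List.countP_cons] at hc ⊢; simp at hc ⊢; omega
        rw [chunk_cons4_cons f p' b s' hb,
          ih p' (b :: s') hc' (by simp only [List.length_cons] at hf ⊢; omega)]
        simp only [List.length_cons]
        rw [show p'.length + 1 + (s'.length + 1) = (p'.length + (s'.length + 1)) + 1 by omega,
          nslWalk_cons_cons, if_pos ⟨rfl, hb⟩]
      · subst hb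
        have hc' : (a :: p').countP (fun x => x != 4) = s'.countP (fun x => x != 4) := by
          simp only [List.countP_cons] at hc ⊢; simp at hc ⊢; omega
        rw [chunk_cons_cons4 f a p' s' ha,
          ih (a :: p') s' hc' (by simp only [List.length_cons] at hf ⊢; omega)]
        simp only [List.length_cons]
        rw [show p'.length + 1 + (s'.length + 1) = (p'.length + 1 + s'.length) + 1 by omega,
          nslWalk_cons_cons, if_neg (fun h => ha h.1), if_pos ⟨ha, rfl⟩]
      · -- neither head is 4: a whole chunk is copied at C speed
        have hni := ni_cons_of_ne a p' ha
        have hnj := ni_cons_of_ne b s' hb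
        set p := a :: p' with hp
        set s := b :: s' with hs
        have hnip : (PySem.List.index? p 4).getD p.length ≤ p.length := ni_le_length p
        have hnjs : (PySem.List.index? s 4).getD s.length ≤ s.length := ni_le_length s
        have hni1 : 1 ≤ (PySem.List.index? p 4).getD p.length := by rw [hp, hni]; omega
        have hnj1 : 1 ≤ (PySem.List.index? s 4).getD s.length := by rw [hs, hnj]; omega
        have hk1 : 1 ≤ min ((PySem.List.index? p 4).getD p.length)
            ((PySem.List.index? s 4).getD s.length) := by omega
        set k := min ((PySem.List.index? p 4).getD p.length)
            ((PySem.List.index? s 4).getD s.length) with hkdef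
        have hcp := countP_drop_index k p (by omega) (by omega)
        have hcs := countP_drop_index k s (by omega) (by omega)
        have hc' : (p.drop k).countP (fun x => x != 4) = (s.drop k).countP (fun x => x != 4) := by
          omega
        simp only [nslChunk]
        rw [if_neg (by simp [hp])]
        rw [if_pos (by rw [← hkdef]; omega)]
        rw [← hkdef]
        rw [ih (p.drop k) (s.drop k) hc' (by simp [hp, hs] at hf ⊢; omega)]
        rw [walk_skip k p s (by omega) (by omega) (by omega) (by omega)]
        simp

-- ===== VERDICT (by name: the statement is the Claim_ definition above) =====
theorem normailize_sentence_length_spec : Claim_equal_normailize_sentence_length := by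
  intro p s _ hpre
  unfold Spec_normailize_sentence_length normailize_sentence_length normailize_sentence_length_alt
  have h := nslLoopA_eq (p.length + s.length + 1) p s [] [] 0 (by simp) (by simp)
    (by simp) (by simp) (by omega)
  simp only [List.nil_append] at h
  rw [h, nslWalk_fuel (p.length + s.length + 1) (p.length + s.length) p s (by omega) (by omega),
    chunk_eq_walk (p.length + s.length) p s hpre (le_refl _)]
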